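-- pv_equiv track=rewrite | github.com/schraderSimon/masterthesis | coding/evc_CISD/CISD_solver_ny.py | state_creator
-- ===== SOURCE A (Python) =====
-- def state_creator(N_elec_half,N_basis_spatial):
--     groundstring="1"*N_elec_half+"0"*(N_basis_spatial-N_elec_half) #Ground state Slater determinant
--     alpha_singleexcitations=[]
--     for i in range(N_elec_half):
--         for j in range(N_elec_half,N_basis_spatial):
--             newstring=groundstring[:i]+"0"+groundstring[i+1:j]+"1"+groundstring[j+1:] #Take the ith 1 and move it to position j
--             alpha_singleexcitations.append(newstring)
--     alpha_doubleexcitations=[]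
--     for i in range(N_elec_half):
--         for j in range(i+1,N_elec_half):
--             for k in range(N_elec_half,N_basis_spatial):
--                 for l in range(k+1,N_basis_spatial):
--                     newstring=groundstring[:i]+"0"+groundstring[i+1:j]+"0"+groundstring[j+1:k]+"1"+groundstring[k+1:l]+"1"+groundstring[l+1:]#Take the ith & jth 1 and move it to positions k and l
--                     alpha_doubleexcitations.append(newstring)
--     GS=[[groundstring,groundstring]]
--     singles_alpha=[[alpha,groundstring] for alpha in alpha_singleexcitations] #All single excitations within alpha
--     singles_beta=[[groundstring,alpha] for alpha in alpha_singleexcitations]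
--     doubles_alpha=[[alpha,groundstring] for alpha in alpha_doubleexcitations]
--     doubles_beta=[[groundstring,alpha] for alpha in alpha_doubleexcitations]
--     doubles_alphabeta=[[alpha,beta] for alpha in alpha_singleexcitations for beta in alpha_singleexcitations]
--     allstates=GS+singles_alpha+singles_beta+doubles_alpha+doubles_beta+doubles_alphabeta
--     return allstates
-- ===== SOURCE B (Python) =====
-- def state_creator(N_elec_half, N_basis_spatial):
--     # Occupation-set representation: a determinant is the set of occupied spatial
--     # orbitals; excitations are set algebra, rendered once to a bitstring.
--     occupied = list(range(N_elec_half))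
--     virtual = list(range(N_elec_half, N_basis_spatial))
--     ground = set(occupied)
--     # number of orbital slots in the bitstring (clamped, like "1"*n + "0"*m for any ints)
--     n_orb = max(N_elec_half, 0) + max(N_basis_spatial - N_elec_half, 0)
--
--     def render(occ):
--         return ''.join('1' if p in occ else '0' for p in range(n_orb))
--
--     g = render(ground)
--     singles = [render(ground - {i} | {j}) for i in occupied for j in virtual]
--     doubles = [render(ground - {i, j} | {k, l})
--                for i in occupied for j in occupied if i < j
--                for k in virtual for l in virtual if k < l]
--
--     states = [[g, g]]
--     states += [[s, g] for s in singles]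
--     states += [[g, s] for s in singles]
--     states += [[d, g] for d in doubles]
--     states += [[g, d] for d in doubles]
--     states += [[a, b] for a in singles for b in singles]
--     return states
-- ===== Notes on version B (the rewrite author's own statement) =====
-- stated objective: idiomatic
-- what changed: Each determinant is represented as a set of occupied orbital indices built by set algebra ((ground - {i}) | {j}, (ground - {i,j}) | {k,l}) and rendered once to a bitstring by a single membership join over the orbital range, instead of A's five-way string slicing and concatenation per determinant; the six groups are assembled in the same order.
import Mathlib
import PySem

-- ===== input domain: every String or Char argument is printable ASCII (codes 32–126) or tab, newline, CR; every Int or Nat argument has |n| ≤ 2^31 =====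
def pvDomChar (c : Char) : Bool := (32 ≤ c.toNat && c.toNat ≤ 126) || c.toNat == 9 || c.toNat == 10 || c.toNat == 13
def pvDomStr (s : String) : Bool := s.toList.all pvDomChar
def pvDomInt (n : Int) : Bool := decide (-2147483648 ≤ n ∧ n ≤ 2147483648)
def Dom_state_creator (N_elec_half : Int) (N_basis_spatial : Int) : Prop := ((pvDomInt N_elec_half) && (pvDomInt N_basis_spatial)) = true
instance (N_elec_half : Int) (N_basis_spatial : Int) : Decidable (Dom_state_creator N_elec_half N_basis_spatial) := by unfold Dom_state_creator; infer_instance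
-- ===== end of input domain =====

-- B replaces A's five-way string slicing by an occupation-set representation rendered
-- to a bitstring by membership (idiomatic restructuring; same asymptotic cost).


-- ===== PORT A =====
-- Python strings are modelled as List Char (PySem convention); String.ofList wraps where the pairs are built.
def pvGroundA (N_elec_half : Int) (N_basis_spatial : Int) : List Char :=
  PySem.List.pyRepeat ['1'] N_elec_half ++ PySem.List.pyRepeat ['0'] (N_basis_spatial - N_elec_half)

-- groundstring[:i]+"0"+groundstring[i+1:j]+"1"+groundstring[j+1:]
def pvSingleA (g : List Char) (i j : Int) : List Char :=
  PySem.List.slice g none (some i) ++ ['0'] ++ PySem.List.slice g (some (i+1)) (some j)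
    ++ ['1'] ++ PySem.List.slice g (some (j+1)) none

-- groundstring[:i]+"0"+groundstring[i+1:j]+"0"+groundstring[j+1:k]+"1"+groundstring[k+1:l]+"1"+groundstring[l+1:]
def pvDoubleA (g : List Char) (i j k l : Int) : List Char :=
  PySem.List.slice g none (some i) ++ ['0'] ++ PySem.List.slice g (some (i+1)) (some j)
    ++ ['0'] ++ PySem.List.slice g (some (j+1)) (some k) ++ ['1']
    ++ PySem.List.slice g (some (k+1)) (some l) ++ ['1'] ++ PySem.List.slice g (some (l+1)) none

def state_creator (N_elec_half : Int) (N_basis_spatial : Int) : List (List String) :=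
  let g := pvGroundA N_elec_half N_basis_spatial
  let alpha_singleexcitations :=
    (PySem.List.pyRange 0 N_elec_half 1).foldl (fun acc i =>
      (PySem.List.pyRange N_elec_half N_basis_spatial 1).foldl (fun acc2 j =>
        acc2 ++ [pvSingleA g i j]) acc) []
  let alpha_doubleexcitations :=
    (PySem.List.pyRange 0 N_elec_half 1).foldl (fun acc i =>
      (PySem.List.pyRange (i+1) N_elec_half 1).foldl (fun acc2 j =>
        (PySem.List.pyRange N_elec_half N_basis_spatial 1).foldl (fun acc3 k =>
          (PySem.List.pyRange (k+1) N_basis_spatial 1).foldl (fun acc4 l =>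
            acc4 ++ [pvDoubleA g i j k l]) acc3) acc2) acc) []
  let gs := String.ofList g
  [[gs, gs]]
    ++ alpha_singleexcitations.map (fun a => [String.ofList a, gs])
    ++ alpha_singleexcitations.map (fun a => [gs, String.ofList a])
    ++ alpha_doubleexcitations.map (fun a => [String.ofList a, gs])
    ++ alpha_doubleexcitations.map (fun a => [gs, String.ofList a])
    ++ alpha_singleexcitations.flatMap (fun a =>
         alpha_singleexcitations.map (fun b => [String.ofList a, String.ofList b]))

-- ===== PORT B =====
-- ''.join('1' if p in occ else '0' for p in range(N_basis_spatial))
def pvRenderB (N_basis_spatial : Int) (occ : PySem.Set Int) : String :=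
  String.ofList ((PySem.List.pyRange 0 N_basis_spatial 1).map
    (fun p => if PySem.Set.contains occ p then '1' else '0'))

def state_creator_alt (N_elec_half : Int) (N_basis_spatial : Int) : List (List String) :=
  let occupied := PySem.List.pyRange 0 N_elec_half 1
  let virtual := PySem.List.pyRange N_elec_half N_basis_spatial 1
  let ground : PySem.Set Int := PySem.Set.ofList occupied
  -- n_orb = max(N_elec_half, 0) + max(N_basis_spatial - N_elec_half, 0)
  let n_orb := max N_elec_half 0 + max (N_basis_spatial - N_elec_half) 0
  let g := pvRenderB n_orb ground
  let singles := occupied.flatMap (fun i => virtual.map (fun j =>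
    pvRenderB n_orb (PySem.Set.union (PySem.Set.diff ground [i]) [j])))
  let doubles := occupied.flatMap (fun i =>
    (occupied.filter (fun j => decide (i < j))).flatMap (fun j =>
      virtual.flatMap (fun k =>
        (virtual.filter (fun l => decide (k < l))).map (fun l =>
          pvRenderB n_orb (PySem.Set.union (PySem.Set.diff ground [i, j]) [k, l])))))
  [[g, g]]
    ++ singles.map (fun s => [s, g])
    ++ singles.map (fun s => [g, s])
    ++ doubles.map (fun d => [d, g])
    ++ doubles.map (fun d => [g, d])
    ++ singles.flatMap (fun a => singles.map (fun b => [a, b]))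

-- ===== PRECONDITION & SPEC =====
def Spec_state_creator (N_elec_half : Int) (N_basis_spatial : Int) (out : List (List String)) : Prop := out = state_creator_alt N_elec_half N_basis_spatial
instance (N_elec_half : Int) (N_basis_spatial : Int) (out : List (List String)) : Decidable (Spec_state_creator N_elec_half N_basis_spatial out) := by unfold Spec_state_creator; infer_instance

-- ===== CLAIM (what is proved, stated in full; the proofs are below) =====
def Claim_equal_state_creator : Prop := ∀ (N_elec_half : Int) (N_basis_spatial : Int), Dom_state_creator N_elec_half N_basis_spatial → Spec_state_creator N_elec_half N_basis_spatial (state_creator N_elec_half N_basis_spatial)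

-- ===== LEMMAS AND PROOFS =====

-- map over range is constant-like replicate
theorem pv_map_range_const (a b : Int) (f : Int → Char) (c : Char)
    (h : ∀ p, a ≤ p → p < b → f p = c) :
    (PySem.List.pyRange a b 1).map f = List.replicate (b - a).toNat c := by
  rw [List.map_congr_left (g := fun _ => c) (fun x hx => by
        rw [PySem.List.mem_pyRange_one] at hx; exact h x hx.1 hx.2),
      List.map_const' .., PySem.List.length_pyRange_one]

-- ground string is the membership rendering of [0, Ne)
theorem pv_ground_eq (Ne Nb : Int) (h0 : 0 ≤ Ne) (h1 : Ne ≤ Nb) :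
    pvGroundA Ne Nb
      = (PySem.List.pyRange 0 Nb 1).map (fun p => if p < Ne then '1' else '0') := by
  unfold pvGroundA
  rw [PySem.List.pyRange_one_append 0 Ne Nb h0 h1, List.map_append,
      pv_map_range_const 0 Ne _ '1' (fun p hp hp' => by simp [hp']),
      pv_map_range_const Ne Nb _ '0' (fun p hp hp' => by simp [not_lt.mpr hp]),
      PySem.List.pyRepeat_singleton, PySem.List.pyRepeat_singleton]
  norm_num

-- slices of a rendered range
theorem pv_slice_to (Nb b : Int) (f : Int → Char) (h0 : 0 ≤ b) (h1 : b ≤ Nb) :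
    PySem.List.slice ((PySem.List.pyRange 0 Nb 1).map f) none (some b)
      = (PySem.List.pyRange 0 b 1).map f := by
  rw [PySem.List.slice_to _ h0, PySem.List.pyRange_one_append 0 b Nb h0 h1, List.map_append,
      List.take_left' (by rw [List.length_map, PySem.List.length_pyRange_one]; omega)]

theorem pv_slice_from (Nb a : Int) (f : Int → Char) (h0 : 0 ≤ a) (h1 : a ≤ Nb) :
    PySem.List.slice ((PySem.List.pyRange 0 Nb 1).map f) (some a) none
      = (PySem.List.pyRange a Nb 1).map f := by
  rw [PySem.List.slice_from _ h0, PySem.List.pyRange_one_append 0 a Nb h0 h1, List.map_append,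
      List.drop_left' (by rw [List.length_map, PySem.List.length_pyRange_one]; omega)]

theorem pv_slice_mid (Nb a b : Int) (f : Int → Char) (h0 : 0 ≤ a) (hab : a ≤ b) (h1 : b ≤ Nb) :
    PySem.List.slice ((PySem.List.pyRange 0 Nb 1).map f) (some a) (some b)
      = (PySem.List.pyRange a b 1).map f := by
  rw [PySem.List.slice_toNat _ h0 (by omega), PySem.List.pyRange_one_append 0 a Nb h0 (by omega),
      List.map_append,
      List.drop_left' (by rw [List.length_map, PySem.List.length_pyRange_one]; omega),
      PySem.List.pyRange_one_append a b Nb hab h1, List.map_append,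
      List.take_left' (by rw [List.length_map, PySem.List.length_pyRange_one]; omega)]

theorem pv_single_eq (Ne Nb i j : Int) (hi0 : 0 ≤ i) (hi : i < Ne) (hj : Ne ≤ j) (hj' : j < Nb) :
    PySem.List.slice ((PySem.List.pyRange 0 Nb 1).map (fun p => if p < Ne then '1' else '0')) none (some i) ++ ['0']
      ++ PySem.List.slice ((PySem.List.pyRange 0 Nb 1).map (fun p => if p < Ne then '1' else '0')) (some (i+1)) (some j) ++ ['1']
      ++ PySem.List.slice ((PySem.List.pyRange 0 Nb 1).map (fun p => if p < Ne then '1' else '0')) (some (j+1)) none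
      = (PySem.List.pyRange 0 Nb 1).map (fun p => if (p < Ne ∧ p ≠ i) ∨ p = j then '1' else '0') := by
  rw [pv_slice_to Nb i _ hi0 (by omega), pv_slice_mid Nb (i+1) j _ (by omega) (by omega) (by omega),
      pv_slice_from Nb (j+1) _ (by omega) (by omega),
      PySem.List.pyRange_one_append 0 i Nb hi0 (by omega),
      PySem.List.pyRange_one_append i (i+1) Nb (by omega) (by omega),
      PySem.List.pyRange_one_append (i+1) j Nb (by omega) (by omega),
      PySem.List.pyRange_one_append j (j+1) Nb (by omega) (by omega),
      PySem.List.pyRange_one_singleton, PySem.List.pyRange_one_singleton]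
  have e1 : (PySem.List.pyRange 0 i 1).map (fun p => if (p < Ne ∧ p ≠ i) ∨ p = j then '1' else '0')
      = (PySem.List.pyRange 0 i 1).map (fun p => if p < Ne then '1' else '0') :=
    List.map_congr_left (fun p hp => by
      rw [PySem.List.mem_pyRange_one] at hp; split_ifs <;> first | rfl | omega)
  have e2 : (PySem.List.pyRange (i+1) j 1).map (fun p => if (p < Ne ∧ p ≠ i) ∨ p = j then '1' else '0')
      = (PySem.List.pyRange (i+1) j 1).map (fun p => if p < Ne then '1' else '0') :=
    List.map_congr_left (fun p hp => by
      rw [PySem.List.mem_pyRange_one] at hp; split_ifs <;> first | rfl | omega)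
  have e3 : (PySem.List.pyRange (j+1) Nb 1).map (fun p => if (p < Ne ∧ p ≠ i) ∨ p = j then '1' else '0')
      = (PySem.List.pyRange (j+1) Nb 1).map (fun p => if p < Ne then '1' else '0') :=
    List.map_congr_left (fun p hp => by
      rw [PySem.List.mem_pyRange_one] at hp; split_ifs <;> first | rfl | omega)
  simp [e1, e2, e3]
  omega

theorem pv_map_seg_congr (a b Ne : Int) (P : Int → Prop) [DecidablePred P]
    (h : ∀ p, a ≤ p → p < b → (P p ↔ p < Ne)) :
    (PySem.List.pyRange a b 1).map (fun p => if P p then '1' else '0')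
      = (PySem.List.pyRange a b 1).map (fun p => if p < Ne then '1' else '0') :=
  List.map_congr_left (fun p hp => by
    rw [PySem.List.mem_pyRange_one] at hp
    have := h p hp.1 hp.2; split_ifs <;> tauto)

theorem pv_double_eq (Ne Nb i j k l : Int) (hi0 : 0 ≤ i) (hij : i < j) (hj : j < Ne)
    (hk : Ne ≤ k) (hkl : k < l) (hl : l < Nb) :
    PySem.List.slice ((PySem.List.pyRange 0 Nb 1).map (fun p => if p < Ne then '1' else '0')) none (some i) ++ ['0']
      ++ PySem.List.slice ((PySem.List.pyRange 0 Nb 1).map (fun p => if p < Ne then '1' else '0')) (some (i+1)) (some j) ++ ['0']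
      ++ PySem.List.slice ((PySem.List.pyRange 0 Nb 1).map (fun p => if p < Ne then '1' else '0')) (some (j+1)) (some k) ++ ['1']
      ++ PySem.List.slice ((PySem.List.pyRange 0 Nb 1).map (fun p => if p < Ne then '1' else '0')) (some (k+1)) (some l) ++ ['1']
      ++ PySem.List.slice ((PySem.List.pyRange 0 Nb 1).map (fun p => if p < Ne then '1' else '0')) (some (l+1)) none
      = (PySem.List.pyRange 0 Nb 1).map (fun p => if (p < Ne ∧ p ≠ i ∧ p ≠ j) ∨ p = k ∨ p = l then '1' else '0') := by
  rw [pv_slice_to Nb i _ hi0 (by omega),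
      pv_slice_mid Nb (i+1) j _ (by omega) (by omega) (by omega),
      pv_slice_mid Nb (j+1) k _ (by omega) (by omega) (by omega),
      pv_slice_mid Nb (k+1) l _ (by omega) (by omega) (by omega),
      pv_slice_from Nb (l+1) _ (by omega) (by omega),
      PySem.List.pyRange_one_append 0 i Nb hi0 (by omega),
      PySem.List.pyRange_one_append i (i+1) Nb (by omega) (by omega),
      PySem.List.pyRange_one_append (i+1) j Nb (by omega) (by omega),
      PySem.List.pyRange_one_append j (j+1) Nb (by omega) (by omega),
      PySem.List.pyRange_one_append (j+1) k Nb (by omega) (by omega),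
      PySem.List.pyRange_one_append k (k+1) Nb (by omega) (by omega),
      PySem.List.pyRange_one_append (k+1) l Nb (by omega) (by omega),
      PySem.List.pyRange_one_append l (l+1) Nb (by omega) (by omega),
      PySem.List.pyRange_one_singleton, PySem.List.pyRange_one_singleton,
      PySem.List.pyRange_one_singleton, PySem.List.pyRange_one_singleton]
  have e1 := pv_map_seg_congr 0 i Ne (fun p => (p < Ne ∧ p ≠ i ∧ p ≠ j) ∨ p = k ∨ p = l)
      (fun p h1 h2 => by omega)
  have e2 := pv_map_seg_congr (i+1) j Ne (fun p => (p < Ne ∧ p ≠ i ∧ p ≠ j) ∨ p = k ∨ p = l)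
      (fun p h1 h2 => by omega)
  have e3 := pv_map_seg_congr (j+1) k Ne (fun p => (p < Ne ∧ p ≠ i ∧ p ≠ j) ∨ p = k ∨ p = l)
      (fun p h1 h2 => by omega)
  have e4 := pv_map_seg_congr (k+1) l Ne (fun p => (p < Ne ∧ p ≠ i ∧ p ≠ j) ∨ p = k ∨ p = l)
      (fun p h1 h2 => by omega)
  have e5 := pv_map_seg_congr (l+1) Nb Ne (fun p => (p < Ne ∧ p ≠ i ∧ p ≠ j) ∨ p = k ∨ p = l)
      (fun p h1 h2 => by omega)
  simp only [e1, e2, e3, e4, e5, List.map_append, List.map_cons, List.map_nil]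
  simp
  omega

theorem pv_flatMap_congr {α β : Type} {l : List α} {f g : α → List β}
    (h : ∀ x ∈ l, f x = g x) : l.flatMap f = l.flatMap g := by
  induction l with
  | nil => rfl
  | cons x xs ih =>
    simp only [List.flatMap_cons, h x (by simp)]
    rw [ih (fun y hy => h y (by simp [hy]))]

theorem pv_filter_lt (a b i : Int) (h1 : a ≤ i + 1) (h2 : i + 1 ≤ b) :
    (PySem.List.pyRange a b 1).filter (fun x => decide (i < x)) = PySem.List.pyRange (i+1) b 1 := by
  rw [PySem.List.pyRange_one_append a (i+1) b h1 h2, List.filter_append,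
      List.filter_eq_nil_iff.mpr (fun x hx => by
        rw [PySem.List.mem_pyRange_one] at hx; simpa using by omega),
      List.filter_eq_self.mpr (fun x hx => by
        rw [PySem.List.mem_pyRange_one] at hx; simpa using by omega), List.nil_append]

theorem pv_if_contains (occ : PySem.Set Int) (P : Prop) [Decidable P] (p : Int)
    (h : p ∈ occ ↔ P) :
    (if PySem.Set.contains occ p then '1' else '0') = (if P then '1' else '0') := by
  have hc : PySem.Set.contains occ p = true ↔ P := by
    rw [PySem.Set.contains_iff]; exact h
  by_cases hp : P
  · rw [if_pos (hc.mpr hp), if_pos hp]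
  · rw [if_neg (fun ht => hp (hc.mp ht)), if_neg hp]

theorem pv_mem_ground (Ne p : Int) :
    p ∈ PySem.Set.ofList (PySem.List.pyRange 0 Ne 1) ↔ 0 ≤ p ∧ p < Ne := by
  rw [PySem.Set.mem_ofList, PySem.List.mem_pyRange_one]

theorem pv_render_single (Ne Nb i j : Int) (h1 : Ne ≤ Nb) (hi0 : 0 ≤ i) (hi : i < Ne)
    (hj : Ne ≤ j) (hj' : j < Nb) :
    String.ofList (pvSingleA (pvGroundA Ne Nb) i j)
      = pvRenderB Nb (PySem.Set.union (PySem.Set.diff (PySem.Set.ofList (PySem.List.pyRange 0 Ne 1)) [i]) [j]) := by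
  unfold pvSingleA pvRenderB
  rw [pv_ground_eq Ne Nb (by omega) h1]
  congr 1
  rw [pv_single_eq Ne Nb i j hi0 hi hj hj']
  refine List.map_congr_left (fun p hp => ?_)
  rw [PySem.List.mem_pyRange_one] at hp
  refine ((pv_if_contains _ ((p < Ne ∧ p ≠ i) ∨ p = j) p ?_)).symm
  rw [PySem.Set.mem_union, PySem.Set.mem_diff, pv_mem_ground, List.mem_singleton, List.mem_singleton]
  omega

theorem pv_render_double (Ne Nb i j k l : Int) (h1 : Ne ≤ Nb) (hi0 : 0 ≤ i) (hij : i < j)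
    (hj : j < Ne) (hk : Ne ≤ k) (hkl : k < l) (hl : l < Nb) :
    String.ofList (pvDoubleA (pvGroundA Ne Nb) i j k l)
      = pvRenderB Nb (PySem.Set.union (PySem.Set.diff (PySem.Set.ofList (PySem.List.pyRange 0 Ne 1)) [i, j]) [k, l]) := by
  unfold pvDoubleA pvRenderB
  rw [pv_ground_eq Ne Nb (by omega) h1]
  congr 1
  rw [pv_double_eq Ne Nb i j k l hi0 hij hj hk hkl hl]
  refine List.map_congr_left (fun p hp => ?_)
  rw [PySem.List.mem_pyRange_one] at hp
  refine ((pv_if_contains _ ((p < Ne ∧ p ≠ i ∧ p ≠ j) ∨ p = k ∨ p = l) p ?_)).symm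
  rw [PySem.Set.mem_union, PySem.Set.mem_diff, pv_mem_ground]
  simp only [List.mem_cons, List.not_mem_nil, or_false]
  omega

theorem pv_render_ground (Ne Nb : Int) (h0 : 0 ≤ Ne) (h1 : Ne ≤ Nb) :
    String.ofList (pvGroundA Ne Nb)
      = pvRenderB Nb (PySem.Set.ofList (PySem.List.pyRange 0 Ne 1)) := by
  unfold pvRenderB
  rw [pv_ground_eq Ne Nb h0 h1]
  congr 1
  refine List.map_congr_left (fun p hp => ?_)
  rw [PySem.List.mem_pyRange_one] at hp
  refine ((pv_if_contains _ (p < Ne) p ?_)).symm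
  rw [pv_mem_ground]; omega

theorem pv_ground_eq_total (Ne Nb : Int) :
    pvGroundA Ne Nb = (PySem.List.pyRange 0 (max Ne 0 + max (Nb - Ne) 0) 1).map
      (fun p => if p < Ne then '1' else '0') := by
  by_cases h0 : 0 ≤ Ne
  · unfold pvGroundA
    rw [PySem.List.pyRange_one_append 0 Ne (max Ne 0 + max (Nb - Ne) 0) h0 (by omega),
        List.map_append,
        pv_map_range_const 0 Ne _ '1' (fun p hp hp' => by simp [hp']),
        pv_map_range_const Ne (max Ne 0 + max (Nb - Ne) 0) _ '0'
          (fun p hp hp' => by simp [not_lt.mpr hp]),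
        PySem.List.pyRepeat_singleton, PySem.List.pyRepeat_singleton]
    have e1 : (Ne - 0).toNat = Ne.toNat := by omega
    have e2 : (max Ne 0 + max (Nb - Ne) 0 - Ne).toNat = (Nb - Ne).toNat := by omega
    rw [e1, e2]
  · unfold pvGroundA
    rw [pv_map_range_const 0 (max Ne 0 + max (Nb - Ne) 0) _ '0'
          (fun p hp hp' => by rw [if_neg]; omega),
        PySem.List.pyRepeat_singleton, PySem.List.pyRepeat_singleton]
    have e1 : Ne.toNat = 0 := by omega
    have e2 : (max Ne 0 + max (Nb - Ne) 0 - 0).toNat = (Nb - Ne).toNat := by omega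
    rw [e1, e2, List.replicate_zero, List.nil_append]

theorem pv_flatMap_empty {α β : Type} (l : List α) :
    l.flatMap (fun _ => ([] : List β)) = [] := by
  induction l with
  | nil => rfl
  | cons x xs ih => simp [List.flatMap_cons, ih]

theorem pv_render_ground_total (Ne Nb : Int) :
    String.ofList (pvGroundA Ne Nb)
      = pvRenderB (max Ne 0 + max (Nb - Ne) 0) (PySem.Set.ofList (PySem.List.pyRange 0 Ne 1)) := by
  unfold pvRenderB
  rw [pv_ground_eq_total Ne Nb]
  congr 1
  refine List.map_congr_left (fun p hp => ?_)
  rw [PySem.List.mem_pyRange_one] at hp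
  refine ((pv_if_contains _ (p < Ne) p ?_)).symm
  rw [pv_mem_ground]; omega

-- ===== VERDICT (by name: the statement is the Claim_ definition above) =====
theorem state_creator_spec : Claim_equal_state_creator := by
  intro Ne Nb _
  unfold Spec_state_creator state_creator state_creator_alt
  simp only [PySem.List.foldl_append_singleton_eq_map, PySem.List.foldl_append_eq_flatMap,
    List.nil_append]
  by_cases hM : 0 ≤ Ne ∧ Ne ≤ Nb
  case neg =>
    rcases (by omega : Ne ≤ 0 ∨ Nb ≤ Ne) with hc | hc
    · simp [PySem.List.pyRange_one_eq_nil hc, pv_render_ground_total Ne Nb]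
    · simp [PySem.List.pyRange_one_eq_nil hc, pv_flatMap_empty, pv_render_ground_total Ne Nb]
  obtain ⟨h0, h1⟩ := hM
  rw [(by omega : max Ne 0 + max (Nb - Ne) 0 = Nb)]
  have hg := pv_render_ground Ne Nb h0 h1
  have hs :
      (List.flatMap (fun i => List.map (pvSingleA (pvGroundA Ne Nb) i) (PySem.List.pyRange Ne Nb 1))
        (PySem.List.pyRange 0 Ne 1)).map String.ofList
      = List.flatMap (fun i => List.map
          (fun j => pvRenderB Nb (((PySem.Set.ofList (PySem.List.pyRange 0 Ne 1)).diff [i]).union [j]))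
          (PySem.List.pyRange Ne Nb 1)) (PySem.List.pyRange 0 Ne 1) := by
    rw [List.map_flatMap]
    refine pv_flatMap_congr (fun i hi => ?_)
    rw [PySem.List.mem_pyRange_one] at hi
    rw [List.map_map]
    refine List.map_congr_left (fun j hj => ?_)
    rw [PySem.List.mem_pyRange_one] at hj
    exact pv_render_single Ne Nb i j h1 hi.1 hi.2 hj.1 hj.2
  have hd :
      (List.flatMap (fun i => List.flatMap (fun j => List.flatMap
          (fun k => List.map (pvDoubleA (pvGroundA Ne Nb) i j k) (PySem.List.pyRange (k + 1) Nb 1))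
          (PySem.List.pyRange Ne Nb 1)) (PySem.List.pyRange (i + 1) Ne 1))
        (PySem.List.pyRange 0 Ne 1)).map String.ofList
      = List.flatMap (fun i => List.flatMap (fun j => List.flatMap
          (fun k => List.map
            (fun l => pvRenderB Nb (((PySem.Set.ofList (PySem.List.pyRange 0 Ne 1)).diff [i, j]).union [k, l]))
            (List.filter (fun l => decide (k < l)) (PySem.List.pyRange Ne Nb 1)))
          (PySem.List.pyRange Ne Nb 1))
          (List.filter (fun j => decide (i < j)) (PySem.List.pyRange 0 Ne 1)))
        (PySem.List.pyRange 0 Ne 1) := by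
    rw [List.map_flatMap]
    refine pv_flatMap_congr (fun i hi => ?_)
    rw [PySem.List.mem_pyRange_one] at hi
    rw [pv_filter_lt 0 Ne i (by omega) (by omega), List.map_flatMap]
    refine pv_flatMap_congr (fun j hj => ?_)
    rw [PySem.List.mem_pyRange_one] at hj
    rw [List.map_flatMap]
    refine pv_flatMap_congr (fun k hk => ?_)
    rw [PySem.List.mem_pyRange_one] at hk
    rw [pv_filter_lt Ne Nb k (by omega) (by omega), List.map_map]
    refine List.map_congr_left (fun l hl => ?_)
    rw [PySem.List.mem_pyRange_one] at hl
    exact pv_render_double Ne Nb i j k l h1 hi.1 hj.1 hj.2 hk.1 hl.1 hl.2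
  rw [← hg, ← hs, ← hd]
  simp only [List.map_map, List.flatMap_map, List.map_flatMap, List.flatMap_assoc, Function.comp_def]
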